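-- pv_equiv track=rewrite | github.com/nielsrolf/spar-ood-propensities | lily/propensities/src/scripts/datagen/annotate_propensity_dimensions.py | parse_annotation
-- ===== SOURCE A (Python) =====
-- def parse_annotation(raw: str) -> dict:
--     result = {
--         "clarity": "AMBIGUOUS",
--         "cost": "MEDIUM",
--         "reasoning": "",
--     }
--     for line in raw.strip().splitlines():
--         line = line.strip()
--         if line.startswith("CLARITY:"):
--             val = line.split(":", 1)[1].strip().upper()
--             if val in {"CLEAR", "AMBIGUOUS", "NO_VERDICT"}:
--                 result["clarity"] = val
--         elif line.startswith("COST:"):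
--             val = line.split(":", 1)[1].strip().upper()
--             if val in {"LOW", "MEDIUM", "HIGH"}:
--                 result["cost"] = val
--         elif line.startswith("REASONING:"):
--             result["reasoning"] = line.split(":", 1)[1].strip()
--     return result
-- ===== SOURCE B (Python) =====
-- def parse_annotation(raw: str) -> dict:
--     lines = [l.strip() for l in raw.strip().splitlines()]
--
--     def values(prefix):
--         return [l.split(":", 1)[1].strip() for l in lines if l.startswith(prefix)]
--
--     def last_valid(prefix, allowed):
--         vals = [v for v in (v.upper() for v in values(prefix)) if v in allowed]
--         return vals[-1] if vals else None
--
--     clarity = last_valid("CLARITY:", {"CLEAR", "AMBIGUOUS", "NO_VERDICT"})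
--     cost = last_valid("COST:", {"LOW", "MEDIUM", "HIGH"})
--     reasoning_vals = values("REASONING:")
--     return {
--         "clarity": clarity if clarity is not None else "AMBIGUOUS",
--         "cost": cost if cost is not None else "MEDIUM",
--         "reasoning": reasoning_vals[-1] if reasoning_vals else "",
--     }
-- ===== Notes on version B (the rewrite author's own statement) =====
-- stated objective: idiomatic
-- what changed: Replaced the single sequential line loop with mutable dict state by three independent per-field passes: for each prefix, collect the (validated) candidate values with comprehensions and take the last one, defaulting when none exists.
import Mathlib
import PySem

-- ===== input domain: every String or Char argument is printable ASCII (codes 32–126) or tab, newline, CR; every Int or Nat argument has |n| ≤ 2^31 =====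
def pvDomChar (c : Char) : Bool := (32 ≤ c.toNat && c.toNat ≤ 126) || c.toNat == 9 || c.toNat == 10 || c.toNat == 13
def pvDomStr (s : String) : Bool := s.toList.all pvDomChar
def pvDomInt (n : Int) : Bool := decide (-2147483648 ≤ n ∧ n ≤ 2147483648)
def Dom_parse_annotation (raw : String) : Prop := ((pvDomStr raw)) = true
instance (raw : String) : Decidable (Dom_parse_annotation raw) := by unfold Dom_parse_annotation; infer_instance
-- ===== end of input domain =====

-- B replaces A's sequential mutating line loop by three independent per-field passes
-- (comprehension + last valid match); objective: idiomatic, same cost.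

-- ===== PORT A =====

-- line.split(":", 1)[1].strip()  (shared text of both Pythons)
def pvExtract (line : String) : String :=
  PySem.Str.strip (PySem.List.pyGetD ((PySem.Str.splitMax? line ":" 1).getD []) 1 "")

-- the body of A's for-loop, acting on the (clarity, cost, reasoning) state
def pvStep (res : String × String × String) (line : String) : String × String × String :=
  let line := PySem.Str.strip line
  if PySem.Str.startswith line "CLARITY:" then
    let val := PySem.Str.upper (pvExtract line)
    if (["CLEAR", "AMBIGUOUS", "NO_VERDICT"] : List String).contains val then
      (val, res.2.1, res.2.2)
    else res
  else if PySem.Str.startswith line "COST:" then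
    let val := PySem.Str.upper (pvExtract line)
    if (["LOW", "MEDIUM", "HIGH"] : List String).contains val then
      (res.1, val, res.2.2)
    else res
  else if PySem.Str.startswith line "REASONING:" then
    (res.1, res.2.1, pvExtract line)
  else res

def parse_annotation (raw : String) : List (String × String) :=
  let r := (PySem.Str.splitlines (PySem.Str.strip raw)).foldl pvStep ("AMBIGUOUS", "MEDIUM", "")
  [("clarity", r.1), ("cost", r.2.1), ("reasoning", r.2.2)]

-- ===== PORT B =====

-- [l.split(":",1)[1].strip() for l in lines if l.startswith(prefix)]
def pvValuesFor (lines : List String) (pre : String) : List String :=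
  (lines.filter (fun l => PySem.Str.startswith l pre)).map pvExtract

-- [v for v in (v.upper() for v in values(prefix)) if v in allowed], last or none
def pvLastValid (lines : List String) (pre : String) (allowed : List String) : Option String :=
  (((pvValuesFor lines pre).map PySem.Str.upper).filter (fun v => allowed.contains v)).getLast?

def parse_annotation_alt (raw : String) : List (String × String) :=
  let lines := (PySem.Str.splitlines (PySem.Str.strip raw)).map PySem.Str.strip
  let clarity := pvLastValid lines "CLARITY:" ["CLEAR", "AMBIGUOUS", "NO_VERDICT"]
  let cost := pvLastValid lines "COST:" ["LOW", "MEDIUM", "HIGH"]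
  let reasoning := (pvValuesFor lines "REASONING:").getLast?
  [("clarity", clarity.getD "AMBIGUOUS"),
   ("cost", cost.getD "MEDIUM"),
   ("reasoning", reasoning.getD "")]

-- ===== PRECONDITION & SPEC =====
def Spec_parse_annotation (raw : String) (out : List (String × String)) : Prop := out = parse_annotation_alt raw
instance (raw : String) (out : List (String × String)) : Decidable (Spec_parse_annotation raw out) := by unfold Spec_parse_annotation; infer_instance

-- ===== CLAIM (what is proved, stated in full; the proofs are below) =====
def Claim_equal_parse_annotation : Prop := ∀ (raw : String), Dom_parse_annotation raw → Spec_parse_annotation raw (parse_annotation raw)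

-- ===== LEMMAS AND PROOFS =====

-- the three prefixes are pairwise incompatible as prefixes of one line
lemma pv_excl {l : String} {p q : String} (hpq : ¬ (p.toList <+: q.toList) ∧ ¬ (q.toList <+: p.toList))
    (hp : PySem.Str.startswith l p = true) : PySem.Str.startswith l q = false := by
  simp only [PySem.Str.startswith_eq] at hp ⊢
  rw [Bool.eq_false_iff]
  intro hq
  rw [PySem.Chars.startswith_iff] at hp hq
  rcases List.prefix_or_prefix_of_prefix hp hq with h | h <;> tauto

-- loop invariant: A's fold from any state equals B's per-field last-match reads
lemma pv_fold (ls : List String) (c k r : String) :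
    ls.foldl pvStep (c, k, r) =
      ((pvLastValid (ls.map PySem.Str.strip) "CLARITY:" ["CLEAR", "AMBIGUOUS", "NO_VERDICT"]).getD c,
       (pvLastValid (ls.map PySem.Str.strip) "COST:" ["LOW", "MEDIUM", "HIGH"]).getD k,
       ((pvValuesFor (ls.map PySem.Str.strip) "REASONING:").getLast?).getD r) := by
  induction ls generalizing c k r with
  | nil => simp [pvValuesFor, pvLastValid]
  | cons l ls ih =>
    simp only [List.foldl_cons, List.map_cons]
    by_cases h1 : PySem.Str.startswith (PySem.Str.strip l) "CLARITY:" = true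
    · have h2 := pv_excl (p := "CLARITY:") (q := "COST:") ⟨by decide, by decide⟩ h1
      have h3 := pv_excl (p := "CLARITY:") (q := "REASONING:") ⟨by decide, by decide⟩ h1
      simp at h1 h2 h3
      by_cases hv : (["CLEAR", "AMBIGUOUS", "NO_VERDICT"] : List String).contains
          (PySem.Str.upper (pvExtract (PySem.Str.strip l))) = true
      all_goals simp only [List.contains_eq_mem, List.mem_cons, List.not_mem_nil,
        decide_eq_true_eq, or_false] at hv
      all_goals simp [pvStep, h1, h2, h3, hv, ih, pvValuesFor, pvLastValid, List.getLast?_cons]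
    · by_cases h2 : PySem.Str.startswith (PySem.Str.strip l) "COST:" = true
      · have h3 := pv_excl (p := "COST:") (q := "REASONING:") ⟨by decide, by decide⟩ h2
        simp at h1 h2 h3
        by_cases hv : (["LOW", "MEDIUM", "HIGH"] : List String).contains
            (PySem.Str.upper (pvExtract (PySem.Str.strip l))) = true
        all_goals simp only [List.contains_eq_mem, List.mem_cons, List.not_mem_nil,
          decide_eq_true_eq, or_false] at hv
        all_goals simp [pvStep, h1, h2, h3, hv, ih, pvValuesFor, pvLastValid, List.getLast?_cons]
      · by_cases h3 : PySem.Str.startswith (PySem.Str.strip l) "REASONING:" = true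
        all_goals simp at h1 h2 h3
        all_goals simp [pvStep, h1, h2, h3, ih, pvValuesFor, pvLastValid, List.getLast?_cons]

-- ===== VERDICT (by name: the statement is the Claim_ definition above) =====
theorem parse_annotation_spec : Claim_equal_parse_annotation := by
  intro raw _
  unfold Spec_parse_annotation parse_annotation parse_annotation_alt
  simp [pv_fold]
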